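-- pv_equiv track=rewrite | github.com/MaxMessWithTech/BasicLangV2 | interpreter/utils/splitByCustom.py | splitByCustom
-- ===== SOURCE A (Python) =====
-- def splitByCustom(line: str, splitBy: list) -> list:
-- 	allIndices = list()
-- 	for opp in splitBy:
-- 		res = [i for i in range(len(line)) if line.startswith(opp, i)]
-- 		for index in res:
-- 			try:
-- 				# Case for negative numbers
-- 				if (opp == "-" and not line[index + 1].isnumeric()) or opp != "-":
-- 					allIndices.append({'index': index, 'opp': opp})
-- 			except IndexError:
-- 				allIndices.append({'index': index, 'opp': opp})
--
-- 	out = list()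
-- 	lastIndex = -1
-- 	for indexDict in sorted(allIndices, key=lambda d: d['index']):
-- 		# Makes sure that when there are tuples we don't have weird gaps
-- 		if indexDict['opp'] != "(" and indexDict['opp'] != "[":
-- 			out.append(line[lastIndex + 1:indexDict['index']])
--
-- 		out.append(line[indexDict['index']:indexDict['index'] + len(indexDict['opp'])])
-- 		lastIndex = indexDict['index'] + len(indexDict['opp']) - 1
-- 	# REPLACE HERE GETS RID OF ":"
--
-- 	if len(out) == 0:
-- 		out.append(line[lastIndex + 1:].replace(":", ""))
-- 	elif out[len(out) - 1] != ")" and out[len(out) - 1] != "]":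
-- 		out.append(line[lastIndex + 1:].replace(":", ""))
--
-- 	return out
-- ===== SOURCE B (Python) =====
-- def splitByCustom(line: str, splitBy: list) -> list:
-- 	# Single left-to-right scan: emit segments inline at each match instead of
-- 	# collecting index dicts and sorting them.
-- 	out = list()
-- 	lastIndex = -1
-- 	for i in range(len(line)):
-- 		for opp in splitBy:
-- 			if not line.startswith(opp, i):
-- 				continue
-- 			# negative-number rule: a '-' directly followed by a digit is not an operator
-- 			if opp == "-" and i + 1 < len(line) and line[i + 1].isnumeric():
-- 				continue
-- 			if opp != "(" and opp != "[":
-- 				out.append(line[lastIndex + 1:i])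
-- 			out.append(line[i:i + len(opp)])
-- 			lastIndex = i + len(opp) - 1
-- 	if not out or (out[-1] != ")" and out[-1] != "]"):
-- 		out.append(line[lastIndex + 1:].replace(":", ""))
-- 	return out
-- ===== Notes on version B (the rewrite author's own statement) =====
-- stated objective: simpler
-- what changed: B replaces A's two-phase pipeline (collect an index/operator record list per operator, stable-sort it by index, then process) with a single left-to-right scan over the line that tries the operators in order at each position and emits the segments inline, so the intermediate record list and the sort disappear.
import Mathlib
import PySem

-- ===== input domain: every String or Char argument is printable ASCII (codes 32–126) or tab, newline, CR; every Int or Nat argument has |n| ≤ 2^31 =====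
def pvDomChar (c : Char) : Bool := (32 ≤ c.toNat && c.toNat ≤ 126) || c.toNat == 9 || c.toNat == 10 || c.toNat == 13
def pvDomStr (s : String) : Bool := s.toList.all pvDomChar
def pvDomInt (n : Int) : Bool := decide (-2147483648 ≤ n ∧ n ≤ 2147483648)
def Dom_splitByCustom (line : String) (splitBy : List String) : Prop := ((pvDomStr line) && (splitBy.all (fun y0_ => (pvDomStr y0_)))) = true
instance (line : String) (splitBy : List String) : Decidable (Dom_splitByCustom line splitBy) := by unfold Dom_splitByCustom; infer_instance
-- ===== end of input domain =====

-- B replaces A's collect-all-indices/sort/process pipeline by a single left-to-right scan that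
-- emits segments inline (objective: simpler — the index-dict list and the sort disappear).

-- ===== PORT A =====
-- line.startswith(opp, i) for 0 ≤ i ≤ len(line) (the only offsets either program uses): exact.
def pvStartsAt (line : String) (opp : String) (i : Int) : Bool :=
  PySem.Chars.startswith (line.toList.drop i.toNat) opp.toList

-- 'line[index+1].isnumeric()' is tested on printable-ASCII text (the stated domain), where
-- isnumeric coincides with the single-char digit test PySem.Chars.isdigit.
def splitByCustom (line : String) (splitBy : List String) : List String :=
  -- allIndices: for each opp, all match positions, minus '-' directly followed by a digit
  -- (the try/except IndexError of A appears as the 'none' branch of pyGet?).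
  let allIndices : List (Int × String) := splitBy.foldl (fun acc opp =>
    let res := (PySem.List.pyRange 0 (PySem.Str.len line) 1).filter (fun i => pvStartsAt line opp i)
    res.foldl (fun acc2 index =>
      if opp = "-" then
        match PySem.Str.pyGet? line (index + 1) with
        | some c => if !(PySem.Chars.isdigit c) then acc2 ++ [(index, opp)] else acc2
        | none => acc2 ++ [(index, opp)]      -- IndexError: append
      else acc2 ++ [(index, opp)]) acc) []
  -- process sorted(allIndices, key=lambda d: d['index'])
  let st := (PySem.List.sorted allIndices (fun d => d.1) false).foldl
    (fun (st : List String × Int) d =>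
      let out := if d.2 ≠ "(" ∧ d.2 ≠ "[" then
          st.1 ++ [PySem.Str.slice line (some (st.2 + 1)) (some d.1)] else st.1
      (out ++ [PySem.Str.slice line (some d.1) (some (d.1 + PySem.Str.len d.2))],
       d.1 + PySem.Str.len d.2 - 1)) ([], -1)
  if st.1.length = 0 then
    st.1 ++ [PySem.Str.replace (PySem.Str.slice line (some (st.2 + 1)) none) ":" ""]
  else if st.1.getLastD "" ≠ ")" ∧ st.1.getLastD "" ≠ "]" then
    st.1 ++ [PySem.Str.replace (PySem.Str.slice line (some (st.2 + 1)) none) ":" ""]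
  else st.1

-- ===== PORT B =====
def splitByCustom_alt (line : String) (splitBy : List String) : List String :=
  let n : Int := PySem.Str.len line
  let st := (PySem.List.pyRange 0 n 1).foldl (fun (st : List String × Int) i =>
    splitBy.foldl (fun (st : List String × Int) opp =>
      if pvStartsAt line opp i then
        -- negative-number rule: skip a '-' directly followed by a digit
        if opp = "-" ∧ i + 1 < n ∧ (PySem.Str.pyGet? line (i + 1)).any PySem.Chars.isdigit then st
        else
          let out := if opp ≠ "(" ∧ opp ≠ "[" then
              st.1 ++ [PySem.Str.slice line (some (st.2 + 1)) (some i)] else st.1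
          (out ++ [PySem.Str.slice line (some i) (some (i + PySem.Str.len opp))],
           i + PySem.Str.len opp - 1)
      else st) st) ([], -1)
  if st.1.length = 0 ∨ (st.1.getLastD "" ≠ ")" ∧ st.1.getLastD "" ≠ "]") then
    st.1 ++ [PySem.Str.replace (PySem.Str.slice line (some (st.2 + 1)) none) ":" ""]
  else st.1

-- ===== PRECONDITION & SPEC =====
def Spec_splitByCustom (line : String) (splitBy : List String) (out : List String) : Prop := out = splitByCustom_alt line splitBy
instance (line : String) (splitBy : List String) (out : List String) : Decidable (Spec_splitByCustom line splitBy out) := by unfold Spec_splitByCustom; infer_instance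

-- ===== CLAIM (what is proved, stated in full; the proofs are below) =====
def Claim_equal_splitByCustom : Prop := ∀ (line : String) (splitBy : List String), Dom_splitByCustom line splitBy → Spec_splitByCustom line splitBy (splitByCustom line splitBy)

-- ===== LEMMAS AND PROOFS =====

-- the common match condition at position i (A's keep-rule written without the bound check)
def pvCond (line : String) (opp : String) (i : Int) : Bool :=
  pvStartsAt line opp i &&
    !(decide (opp = "-") && (PySem.Str.pyGet? line (i + 1)).any PySem.Chars.isdigit)

-- the matches at position i, in splitBy order
def pvGroup (line : String) (splitBy : List String) (i : Int) : List (Int × String) :=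
  (splitBy.filter (fun opp => pvCond line opp i)).map (fun opp => (i, opp))

-- all matches in scan order (index-major, splitBy-minor)
def pvC (line : String) (splitBy : List String) : List (Int × String) :=
  (PySem.List.pyRange 0 (PySem.Str.len line) 1).flatMap (pvGroup line splitBy)

-- the shared emit step
def pvStep (line : String) (st : List String × Int) (d : Int × String) : List String × Int :=
  let out := if d.2 ≠ "(" ∧ d.2 ≠ "[" then
      st.1 ++ [PySem.Str.slice line (some (st.2 + 1)) (some d.1)] else st.1
  (out ++ [PySem.Str.slice line (some d.1) (some (d.1 + PySem.Str.len d.2))],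
   d.1 + PySem.Str.len d.2 - 1)

-- insertBy equations
lemma pv_insertBy_nil {α : Type} (b : α → α → Bool) (x : α) :
    PySem.List.insertBy b x [] = [x] := rfl

lemma pv_insertBy_cons {α : Type} (b : α → α → Bool) (x y : α) (ys : List α) :
    PySem.List.insertBy b x (y :: ys) =
      if b x y then x :: y :: ys else y :: PySem.List.insertBy b x ys := rfl

-- stability of one insertion: key-k elements of insertBy x M (M sorted by key)
lemma pv_filter_insertBy (x : Int × String) (M : List (Int × String))
    (hM : M.Pairwise (fun a b => a.1 ≤ b.1)) (k : Int) :
    (PySem.List.insertBy (fun a b => decide (a.1 < b.1)) x M).filter (fun y => decide (y.1 = k)) =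
      if x.1 = k then M.filter (fun y => decide (y.1 = k)) ++ [x]
      else M.filter (fun y => decide (y.1 = k)) := by
  induction M with
  | nil =>
    simp only [pv_insertBy_nil, List.filter_cons, List.filter_nil]
    by_cases hk : x.1 = k <;> simp [hk]
  | cons y ys ih =>
    rw [pv_insertBy_cons]
    have hys := (List.pairwise_cons.mp hM).2
    by_cases hb : x.1 < y.1
    · simp only [hb, decide_true, if_true]
      by_cases hk : x.1 = k
      · have hall : (y :: ys).filter (fun y => decide (y.1 = k)) = [] := by
          rw [List.filter_eq_nil_iff]
          intro z hz
          have hz1 : x.1 < z.1 := by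
            rcases List.mem_cons.mp hz with rfl | hz'
            · exact hb
            · exact lt_of_lt_of_le hb ((List.pairwise_cons.mp hM).1 z hz')
          simp only [decide_eq_true_eq]
          omega
        simp [hk, hall]
      · simp [hk]
    · simp only [hb, decide_false, Bool.false_eq_true, if_false]
      simp only [List.filter_cons]
      rw [ih hys]
      by_cases hk : x.1 = k <;> by_cases hyk : y.1 = k <;> simp [hk, hyk]

-- stability of sorted: key-k elements keep their order
lemma pv_filter_sorted (L : List (Int × String)) (k : Int) :
    (PySem.List.sorted L (fun d => d.1) false).filter (fun y => decide (y.1 = k)) =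
      L.filter (fun y => decide (y.1 = k)) := by
  induction L using List.reverseRecOn with
  | nil => rw [PySem.List.sorted_eq_foldl_insertBy]; rfl
  | append_singleton L x ih =>
    rw [PySem.List.sorted_eq_foldl_insertBy, List.foldl_append, ← PySem.List.sorted_eq_foldl_insertBy]
    simp only [List.foldl_cons, List.foldl_nil]
    rw [pv_filter_insertBy x _ (PySem.List.sorted_pairwise L (fun d => d.1)) k,
      List.filter_append, ih]
    by_cases hk : x.1 = k <;> simp [hk]

-- two key-sorted lists with the same key-k sublists are equal
lemma pv_eq_of_filter (M N : List (Int × String))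
    (hM : M.Pairwise (fun a b => a.1 ≤ b.1)) (hN : N.Pairwise (fun a b => a.1 ≤ b.1))
    (h : ∀ k, M.filter (fun y => decide (y.1 = k)) = N.filter (fun y => decide (y.1 = k))) :
    M = N := by
  induction M generalizing N with
  | nil =>
    cases N with
    | nil => rfl
    | cons y N' =>
      have := h y.1
      simp at this
  | cons x M' ih =>
    cases N with
    | nil =>
      have := h x.1
      simp at this
    | cons y N' =>
      have hMx := (List.pairwise_cons.mp hM).1
      have hNy := (List.pairwise_cons.mp hN).1
      have hyx : y.1 ≤ x.1 := by
        have h1 := h x.1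
        simp only [List.filter_cons, decide_eq_true_eq, if_true] at h1
        by_cases hc : y.1 = x.1
        · omega
        · rw [if_neg hc] at h1
          have hx : x ∈ N'.filter (fun z => decide (z.1 = x.1)) := by
            rw [← h1]; exact List.mem_cons_self
          have := hNy x (List.mem_filter.mp hx).1
          omega
      have hxy : x.1 ≤ y.1 := by
        have h1 := h y.1
        simp only [List.filter_cons, decide_eq_true_eq, if_true] at h1
        by_cases hc : x.1 = y.1
        · omega
        · rw [if_neg hc] at h1
          have hx : y ∈ M'.filter (fun z => decide (z.1 = y.1)) := by
            rw [h1]; exact List.mem_cons_self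
          have := hMx y (List.mem_filter.mp hx).1
          omega
      have hk : x.1 = y.1 := le_antisymm hxy hyx
      have h1 := h x.1
      simp only [List.filter_cons, decide_eq_true_eq, if_true] at h1
      rw [if_pos hk.symm] at h1
      have hxeq : x = y := (List.cons.injEq _ _ _ _ ▸ h1).1
      have htail : M'.filter (fun z => decide (z.1 = x.1)) = N'.filter (fun z => decide (z.1 = x.1)) :=
        (List.cons.injEq _ _ _ _ ▸ h1).2
      subst hxeq
      congr 1
      refine ih N' (List.pairwise_cons.mp hM).2 (List.pairwise_cons.mp hN).2 ?_
      intro k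
      by_cases hkk : k = x.1
      · subst hkk; exact htail
      · have h2 := h k
        simp only [List.filter_cons, decide_eq_true_eq] at h2
        rw [if_neg (by omega), if_neg (by rw [← hk]; omega)] at h2
        exact h2

-- a flatMap of i-tagged groups over a strictly increasing index list is key-sorted
lemma pv_pairwise_flatMap (l : List Int) (g : Int → List (Int × String))
    (hl : l.Pairwise (· < ·)) (hg : ∀ i, ∀ z ∈ g i, z.1 = i) :
    (l.flatMap g).Pairwise (fun a b => a.1 ≤ b.1) := by
  induction l with
  | nil => simp
  | cons a t ih =>
    rw [List.flatMap_cons, List.pairwise_append]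
    refine ⟨?_, ih (List.pairwise_cons.mp hl).2, ?_⟩
    · have : ∀ z ∈ g a, ∀ w ∈ g a, z.1 ≤ w.1 := by
        intro z hz w hw
        rw [hg a z hz, hg a w hw]
      exact List.pairwise_of_forall_mem_list this
    · intro z hz w hw
      rcases List.mem_flatMap.mp hw with ⟨b, hb, hwb⟩
      have hab := (List.pairwise_cons.mp hl).1 b hb
      rw [hg a z hz, hg b w hwb]
      omega

-- pvC is key-sorted
lemma pv_pairwise_C (line : String) (splitBy : List String) :
    (pvC line splitBy).Pairwise (fun a b => a.1 ≤ b.1) := by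
  apply pv_pairwise_flatMap
  · exact PySem.List.pairwise_lt_pyRange_one 0 (PySem.Str.len line)
  · intro i z hz
    rcases List.mem_map.mp hz with ⟨opp, _, rfl⟩
    rfl

-- A's allIndices list, normalised
lemma pv_allIndices_eq (line : String) (splitBy : List String) :
    (splitBy.foldl (fun acc opp =>
      let res := (PySem.List.pyRange 0 (PySem.Str.len line) 1).filter (fun i => pvStartsAt line opp i)
      res.foldl (fun acc2 index =>
        if opp = "-" then
          match PySem.Str.pyGet? line (index + 1) with
          | some c => if !(PySem.Chars.isdigit c) then acc2 ++ [(index, opp)] else acc2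
          | none => acc2 ++ [(index, opp)]
        else acc2 ++ [(index, opp)]) acc) []) =
    splitBy.flatMap (fun opp =>
      ((PySem.List.pyRange 0 (PySem.Str.len line) 1).filter (fun i => pvCond line opp i)).map
        (fun i => (i, opp))) := by
  have hfm := PySem.List.foldl_append_eq_flatMap (fun opp =>
      ((PySem.List.pyRange 0 (PySem.Str.len line) 1).filter (fun i => pvCond line opp i)).map
        (fun i => (i, opp))) splitBy []
  rw [List.nil_append] at hfm
  rw [← hfm]
  apply PySem.List.foldl_congr_mem
  intro acc opp _
  show ((PySem.List.pyRange 0 (PySem.Str.len line) 1).filter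
      (fun i => pvStartsAt line opp i)).foldl _ acc = _
  rw [PySem.List.foldl_congr_mem _ _
    (fun acc2 index =>
      if !(decide (opp = "-") && (PySem.Str.pyGet? line (index + 1)).any PySem.Chars.isdigit)
      then acc2 ++ [(index, opp)] else acc2) _ ?_]
  · rw [PySem.List.foldl_append_if
      (fun index => !(decide (opp = "-") && (PySem.Str.pyGet? line (index + 1)).any PySem.Chars.isdigit))
      (fun i => ((i : Int), opp)), List.filter_filter]
    congr 1
    congr 1
    apply List.filter_congr
    intro i _
    simp [pvCond, Bool.and_comm]
  · intro acc2 index _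
    by_cases ho : opp = "-"
    · simp only [ho]
      cases hg : PySem.Str.pyGet? line (index + 1) with
      | none => simp
      | some c => by_cases hd : PySem.Chars.isdigit c <;> simp [hd]
    · simp [ho]

-- picking the single index k out of a duplicate-free index list
lemma pv_filter_eq_singleton (l : List Int) (hl : l.Nodup) (k : Int) (c : Int → Bool) :
    l.filter (fun i => decide (i = k) && c i) = if k ∈ l ∧ c k then [k] else [] := by
  induction l with
  | nil => simp
  | cons a t ih =>
    have hnd := List.nodup_cons.mp hl
    rw [List.filter_cons]
    by_cases hak : a = k
    · subst hak
      have ht : t.filter (fun i => decide (i = a) && c i) = [] := by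
        rw [List.filter_eq_nil_iff]
        intro z hz
        simp only [Bool.and_eq_true, decide_eq_true_eq, not_and]
        intro h'
        exact absurd (h' ▸ hz) hnd.1
      by_cases hc : c a <;> simp [hc, ht]
    · have hfalse : (decide (a = k) && c a) = false := by simp [hak]
      rw [hfalse, if_neg (by simp), ih hnd.2]
      simp only [List.mem_cons]
      by_cases hk : k ∈ t ∧ c k = true
      · rw [if_pos hk, if_pos ⟨Or.inr hk.1, hk.2⟩]
      · have hni : ¬ ((k = a ∨ k ∈ t) ∧ c k = true) := by
          rintro ⟨hor, hck⟩
          rcases hor with h | h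
          · exact hak h.symm
          · exact hk ⟨h, hck⟩
        rw [if_neg hk, if_neg hni]

-- flatMap that only produces at index k, over a duplicate-free list
lemma pv_flatMap_if (l : List Int) (hl : l.Nodup) (k : Int) (h : Int → List (Int × String)) :
    (l.flatMap (fun i => if i = k then h k else [])) = if k ∈ l then h k else [] := by
  induction l with
  | nil => simp
  | cons a t ih =>
    rw [List.flatMap_cons, ih (List.nodup_cons.mp hl).2]
    by_cases hak : a = k
    · subst hak
      simp [(List.nodup_cons.mp hl).1]
    · simp [hak, Ne.symm hak]

-- a guarded flatMap is a filter-then-map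
lemma pv_flatMap_map (sb : List String) (k : Int) (c : String → Bool) :
    sb.flatMap (fun opp => if c opp then [((k : Int), opp)] else []) =
      (sb.filter c).map (fun opp => (k, opp)) := by
  induction sb with
  | nil => rfl
  | cons o t ih =>
    rw [List.flatMap_cons, List.filter_cons]
    by_cases hc : c o <;> simp [hc, ih]

-- the key-k sublist of one group
lemma pv_group_filter (line : String) (splitBy : List String) (i k : Int) :
    (pvGroup line splitBy i).filter (fun y => decide (y.1 = k)) =
      if i = k then pvGroup line splitBy k else [] := by
  unfold pvGroup
  have hc : ((fun (y : Int × String) => decide (y.1 = k)) ∘ (fun opp => ((i : Int), opp))) =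
      fun _ => decide (i = k) := rfl
  rw [List.filter_map, hc]
  by_cases hik : i = k
  · subst hik; simp
  · simp [hik]

-- a character really read at a nonnegative index lies inside the string
lemma pv_pyGet?_some_lt (s : String) (j : Int) (h : 0 ≤ j) (c : Char)
    (hg : PySem.Str.pyGet? s j = some c) : j < PySem.Str.len s := by
  simp only [PySem.Str.pyGet?, PySem.Chars.pyGet?_eq_listPyGet?, PySem.List.pyGet?,
    PySem.List.pyIdx?, PySem.Str.len_eq] at *
  split at hg
  · split at hg
    · omega
    · simp at hg
  · omega

-- the key-k sublist of both arrangements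
lemma pv_filters_eq (line : String) (splitBy : List String) (k : Int) :
    (splitBy.flatMap (fun opp =>
      ((PySem.List.pyRange 0 (PySem.Str.len line) 1).filter (fun i => pvCond line opp i)).map
        (fun i => (i, opp)))).filter (fun y => decide (y.1 = k)) =
    (pvC line splitBy).filter (fun y => decide (y.1 = k)) := by
  unfold pvC
  rw [List.filter_flatMap, List.filter_flatMap]
  rw [funext (fun i => pv_group_filter line splitBy i k),
    pv_flatMap_if _ (PySem.List.nodup_pyRange_one 0 (PySem.Str.len line)) k]
  have hL : ∀ opp : String,
      (((PySem.List.pyRange 0 (PySem.Str.len line) 1).filter (fun i => pvCond line opp i)).map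
        (fun i => (i, opp))).filter (fun y => decide (y.1 = k)) =
      if k ∈ PySem.List.pyRange 0 (PySem.Str.len line) 1 ∧ pvCond line opp k
      then [(k, opp)] else [] := by
    intro opp
    have hc : ((fun (y : Int × String) => decide (y.1 = k)) ∘ (fun i => ((i : Int), opp))) =
        fun i => decide (i = k) := rfl
    rw [List.filter_map, hc, List.filter_filter,
      pv_filter_eq_singleton _ (PySem.List.nodup_pyRange_one 0 (PySem.Str.len line)) k
        (fun i => pvCond line opp i)]
    by_cases hk : k ∈ PySem.List.pyRange 0 (PySem.Str.len line) 1 ∧ pvCond line opp k = true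
    · rw [if_pos hk, if_pos hk]; rfl
    · rw [if_neg hk, if_neg hk]; rfl
  rw [funext hL]
  by_cases hk : k ∈ PySem.List.pyRange 0 (PySem.Str.len line) 1
  · rw [if_pos hk]
    have : (fun opp => if k ∈ PySem.List.pyRange 0 (PySem.Str.len line) 1 ∧ pvCond line opp k
        then [((k : Int), opp)] else []) =
        fun opp => if pvCond line opp k then [((k : Int), opp)] else [] := by
      funext opp
      by_cases hc : pvCond line opp k = true
      · rw [if_pos ⟨hk, hc⟩, if_pos hc]
      · rw [if_neg (fun h => hc h.2), if_neg hc]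
    rw [this, pv_flatMap_map]
    rfl
  · rw [if_neg hk]
    rw [List.flatMap_eq_nil_iff.mpr]
    intro opp _
    rw [if_neg (fun h => hk h.1)]

-- sorting A's opp-major list gives the scan order pvC
lemma pv_sorted_eq (line : String) (splitBy : List String) :
    PySem.List.sorted (splitBy.flatMap (fun opp =>
      ((PySem.List.pyRange 0 (PySem.Str.len line) 1).filter (fun i => pvCond line opp i)).map
        (fun i => (i, opp)))) (fun d => d.1) false = pvC line splitBy := by
  apply pv_eq_of_filter
  · exact PySem.List.sorted_pairwise _ _
  · exact pv_pairwise_C line splitBy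
  · intro k
    rw [pv_filter_sorted, pv_filters_eq]

-- B's nested scan is the fold of pvStep over pvC
lemma pv_B_fold (line : String) (splitBy : List String) :
    ((PySem.List.pyRange 0 (PySem.Str.len line) 1).foldl (fun (st : List String × Int) i =>
      splitBy.foldl (fun (st : List String × Int) opp =>
        if pvStartsAt line opp i then
          if opp = "-" ∧ i + 1 < PySem.Str.len line ∧
              (PySem.Str.pyGet? line (i + 1)).any PySem.Chars.isdigit then st
          else
            let out := if opp ≠ "(" ∧ opp ≠ "[" then
                st.1 ++ [PySem.Str.slice line (some (st.2 + 1)) (some i)] else st.1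
            (out ++ [PySem.Str.slice line (some i) (some (i + PySem.Str.len opp))],
             i + PySem.Str.len opp - 1)
        else st) st) ([], -1)) =
    (pvC line splitBy).foldl (pvStep line) ([], -1) := by
  unfold pvC
  rw [List.foldl_flatMap]
  apply PySem.List.foldl_congr_mem
  intro st i hi
  have hi' := PySem.List.mem_pyRange_one.mp hi
  unfold pvGroup
  rw [List.foldl_map, List.foldl_filter]
  apply PySem.List.foldl_congr_mem
  intro st2 opp _
  cases hs : pvStartsAt line opp i with
  | false =>
    have hcond : pvCond line opp i = false := by
      unfold pvCond; rw [hs, Bool.false_and]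
    rw [if_neg (by simp), if_neg (by simp [hcond])]
  | true =>
    by_cases ho : opp = "-"
    · cases hg : Option.any PySem.Chars.isdigit (PySem.Str.pyGet? line (i + 1)) with
      | false =>
        have hcond : pvCond line opp i = true := by
          unfold pvCond; rw [hs, hg, Bool.and_false, Bool.not_false, Bool.true_and]
        rw [if_pos rfl, if_neg (by simp), if_pos hcond]
        rfl
      | true =>
        have hlt : i + 1 < PySem.Str.len line := by
          have hex : ∃ c, PySem.Str.pyGet? line (i + 1) = some c := by
            cases ho2 : PySem.Str.pyGet? line (i + 1) with
            | none => rw [ho2] at hg; simp [Option.any] at hg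
            | some c => exact ⟨c, rfl⟩
          rcases hex with ⟨c, hc⟩
          exact pv_pyGet?_some_lt line (i + 1) (by omega) c hc
        have hcond : pvCond line opp i = false := by
          unfold pvCond; rw [hs, hg, ho]; simp
        rw [if_pos rfl, if_pos ⟨ho, hlt, rfl⟩, if_neg (by simp [hcond])]
    · have hcond : pvCond line opp i = true := by
        unfold pvCond; rw [hs]; simp [ho]
      rw [if_pos rfl, if_neg (fun h => ho h.1), if_pos hcond]
      rfl

-- ===== VERDICT (by name: the statement is the Claim_ definition above) =====
theorem splitByCustom_spec : Claim_equal_splitByCustom := by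
  intro line splitBy _
  unfold Spec_splitByCustom splitByCustom splitByCustom_alt
  rw [pv_allIndices_eq]
  simp only [pv_sorted_eq, pv_B_fold]
  have hfold : ∀ (L : List (Int × String)) (s : List String × Int),
      L.foldl (fun (st : List String × Int) d =>
        let out := if d.2 ≠ "(" ∧ d.2 ≠ "[" then
            st.1 ++ [PySem.Str.slice line (some (st.2 + 1)) (some d.1)] else st.1
        (out ++ [PySem.Str.slice line (some d.1) (some (d.1 + PySem.Str.len d.2))],
         d.1 + PySem.Str.len d.2 - 1)) s = L.foldl (pvStep line) s := by
    intro L s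
    rfl
  rw [hfold]
  split_ifs with h1 h2 h3 h4 h5 <;> simp_all
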